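-- pv_equiv track=rewrite | github.com/kentahoriuchi/Atcorder | shojin/4_18/3.py | naname
-- ===== SOURCE A (Python) =====
-- def naname(l):
--     masu = []
--     now = [l[0],l[1]]
--     while now[0] >= 1 and now[1] >= 1:
--         masu.append([now[0]-1,now[1]-1])
--         now = [now[0]-1,now[1]-1]
--     now = [l[0],l[1]]
--     while now[0] >= 1 and now[1] <= 6:
--         masu.append([now[0]-1,now[1]+1])
--         now = [now[0]-1,now[1]+1]
--     now = [l[0],l[1]]
--     while now[0] <= 6 and now[1] >= 1:
--         masu.append([now[0]+1,now[1]-1])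
--         now = [now[0]+1,now[1]-1]
--     now = [l[0],l[1]]
--     while now[0] <= 6 and now[1] <= 6:
--         masu.append([now[0]+1,now[1]+1])
--         now = [now[0]+1,now[1]+1]
--     return masu
-- ===== SOURCE B (Python) =====
-- def naname(l):
--     a, b = l[0], l[1]
--     # Build each FULL clipped diagonal through (a, b) as one ascending list,
--     # then slice it at the centre and reverse the upper half to get the rays.
--     up = max(min(a, b), 0)
--     down = max(min(7 - a, 7 - b), 0)
--     main = [[a + t, b + t] for t in range(-up, down + 1)]
--     ul = list(reversed(main[:up]))
--     dr = main[up + 1:]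
--     dl_len = max(min(7 - a, b), 0)
--     ur_len = max(min(a, 7 - b), 0)
--     anti = [[a - u, b + u] for u in range(-dl_len, ur_len + 1)]
--     dl = list(reversed(anti[:dl_len]))
--     ur = anti[dl_len + 1:]
--     return ul + ur + dl + dr
-- ===== Notes on version B (the rewrite author's own statement) =====
-- stated objective: alternative
-- what changed: Instead of walking four rays cell-by-cell with while-loops, B constructs the two full clipped diagonals through the cell as single ascending lists and obtains the four rays by slicing each diagonal at the centre and reversing the upper halves.
import Mathlib
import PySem

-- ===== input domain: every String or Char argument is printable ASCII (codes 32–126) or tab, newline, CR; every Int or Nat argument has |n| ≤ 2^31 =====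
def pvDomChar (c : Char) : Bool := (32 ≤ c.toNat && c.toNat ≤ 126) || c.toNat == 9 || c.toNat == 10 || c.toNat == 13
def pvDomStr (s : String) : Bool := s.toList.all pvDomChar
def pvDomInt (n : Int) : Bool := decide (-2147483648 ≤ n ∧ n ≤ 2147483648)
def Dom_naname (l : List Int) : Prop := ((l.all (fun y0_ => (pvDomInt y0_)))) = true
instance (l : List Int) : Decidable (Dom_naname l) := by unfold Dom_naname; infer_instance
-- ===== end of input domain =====

-- B builds the two full clipped diagonals through the cell as single ascending lists and
-- derives the four rays by slicing each at the centre and reversing the upper halves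
-- (objective: alternative decomposition; A steps cell-by-cell with four while-loops).

-- ===== PORT A =====
-- the four while-loops of A, one structural recursion each, same state stepping
def nanameLoopUL (a b : Int) : List (List Int) :=
  if 1 ≤ a ∧ 1 ≤ b then [a - 1, b - 1] :: nanameLoopUL (a - 1) (b - 1) else []
termination_by a.toNat
decreasing_by omega

def nanameLoopUR (a b : Int) : List (List Int) :=
  if 1 ≤ a ∧ b ≤ 6 then [a - 1, b + 1] :: nanameLoopUR (a - 1) (b + 1) else []
termination_by a.toNat
decreasing_by omega

def nanameLoopDL (a b : Int) : List (List Int) :=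
  if a ≤ 6 ∧ 1 ≤ b then [a + 1, b - 1] :: nanameLoopDL (a + 1) (b - 1) else []
termination_by b.toNat
decreasing_by omega

def nanameLoopDR (a b : Int) : List (List Int) :=
  if a ≤ 6 ∧ b ≤ 6 then [a + 1, b + 1] :: nanameLoopDR (a + 1) (b + 1) else []
termination_by (7 - a).toNat
decreasing_by omega

def naname (l : List Int) : List (List Int) :=
  match PySem.List.pyGet? l 0, PySem.List.pyGet? l 1 with
  | some a, some b =>
      nanameLoopUL a b ++ nanameLoopUR a b ++ nanameLoopDL a b ++ nanameLoopDR a b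
  | _, _ => []  -- Python raises IndexError here; excluded by Pre_naname

-- ===== PORT B =====
def naname_alt (l : List Int) : List (List Int) :=
  -- l[0], l[1] exist exactly when l has two elements (Pre_); shorter lists raise in Python
  match l with
  | a :: b :: _ =>
      let up := max (min a b) 0
      let down := max (min (7 - a) (7 - b)) 0
      let main := (PySem.List.pyRange (-up) (down + 1) 1).map (fun t => [a + t, b + t])
      let ul := (PySem.List.slice main none (some up)).reverse
      let dr := PySem.List.slice main (some (up + 1)) none
      let dlLen := max (min (7 - a) b) 0
      let urLen := max (min a (7 - b)) 0
      let anti := (PySem.List.pyRange (-dlLen) (urLen + 1) 1).map (fun u => [a - u, b + u])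
      let dl := (PySem.List.slice anti none (some dlLen)).reverse
      let ur := PySem.List.slice anti (some (dlLen + 1)) none
      ul ++ ur ++ dl ++ dr
  | _ => []  -- Python raises IndexError here; excluded by Pre_naname

-- ===== PRECONDITION & SPEC =====
-- Pre_: A indexes l[0] and l[1], so it raises IndexError on lists shorter than 2.
def Pre_naname (l : List Int) : Prop := 2 ≤ l.length
instance (l : List Int) : Decidable (Pre_naname l) := by unfold Pre_naname; infer_instance
def pvWitness_naname : List Int := [3, 5]

def Spec_naname (l : List Int) (out : List (List Int)) : Prop := out = naname_alt l
instance (l : List Int) (out : List (List Int)) : Decidable (Spec_naname l out) := by unfold Spec_naname; infer_instance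

-- ===== CLAIM (what is proved, stated in full; the proofs are below) =====
def Claim_equal_naname : Prop := ∀ (l : List Int), Dom_naname l → Pre_naname l → Spec_naname l (naname l)

-- ===== LEMMAS AND PROOFS =====
-- A's four loops produce a range map, nearest cell first
theorem nanameLoopUL_range : ∀ (n : Nat) (a b : Int), (min a b).toNat = n →
    nanameLoopUL a b = (List.range n).map (fun (k : Nat) => [a - ((k : Int) + 1), b - ((k : Int) + 1)]) := by
  intro n
  induction n with
  | zero =>
      intro a b h
      rw [nanameLoopUL]
      simp only [List.range_zero, List.map_nil]
      have : ¬ (1 ≤ a ∧ 1 ≤ b) := by omega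
      simp [this]
  | succ n ih =>
      intro a b h
      rw [nanameLoopUL]
      have hc : 1 ≤ a ∧ 1 ≤ b := by omega
      rw [if_pos hc, ih (a - 1) (b - 1) (by omega)]
      rw [List.range_succ_eq_map, List.map_cons, List.map_map]
      congr 1
      simp only [List.map_inj_left, Function.comp_apply, List.cons.injEq, and_true]
      intro k _
      omega

theorem nanameLoopUR_range : ∀ (n : Nat) (a b : Int), (min a (7 - b)).toNat = n →
    nanameLoopUR a b = (List.range n).map (fun (k : Nat) => [a - ((k : Int) + 1), b + ((k : Int) + 1)]) := by
  intro n
  induction n with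
  | zero =>
      intro a b h
      rw [nanameLoopUR]
      simp only [List.range_zero, List.map_nil]
      have : ¬ (1 ≤ a ∧ b ≤ 6) := by omega
      simp [this]
  | succ n ih =>
      intro a b h
      rw [nanameLoopUR]
      have hc : 1 ≤ a ∧ b ≤ 6 := by omega
      rw [if_pos hc, ih (a - 1) (b + 1) (by omega)]
      rw [List.range_succ_eq_map, List.map_cons, List.map_map]
      congr 1
      simp only [List.map_inj_left, Function.comp_apply, List.cons.injEq, and_true]
      intro k _
      omega

theorem nanameLoopDL_range : ∀ (n : Nat) (a b : Int), (min (7 - a) b).toNat = n →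
    nanameLoopDL a b = (List.range n).map (fun (k : Nat) => [a + ((k : Int) + 1), b - ((k : Int) + 1)]) := by
  intro n
  induction n with
  | zero =>
      intro a b h
      rw [nanameLoopDL]
      simp only [List.range_zero, List.map_nil]
      have : ¬ (a ≤ 6 ∧ 1 ≤ b) := by omega
      simp [this]
  | succ n ih =>
      intro a b h
      rw [nanameLoopDL]
      have hc : a ≤ 6 ∧ 1 ≤ b := by omega
      rw [if_pos hc, ih (a + 1) (b - 1) (by omega)]
      rw [List.range_succ_eq_map, List.map_cons, List.map_map]
      congr 1
      simp only [List.map_inj_left, Function.comp_apply, List.cons.injEq, and_true]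
      intro k _
      omega

theorem nanameLoopDR_range : ∀ (n : Nat) (a b : Int), (min (7 - a) (7 - b)).toNat = n →
    nanameLoopDR a b = (List.range n).map (fun (k : Nat) => [a + ((k : Int) + 1), b + ((k : Int) + 1)]) := by
  intro n
  induction n with
  | zero =>
      intro a b h
      rw [nanameLoopDR]
      simp only [List.range_zero, List.map_nil]
      have : ¬ (a ≤ 6 ∧ b ≤ 6) := by omega
      simp [this]
  | succ n ih =>
      intro a b h
      rw [nanameLoopDR]
      have hc : a ≤ 6 ∧ b ≤ 6 := by omega
      rw [if_pos hc, ih (a + 1) (b + 1) (by omega)]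
      rw [List.range_succ_eq_map, List.map_cons, List.map_map]
      congr 1
      simp only [List.map_inj_left, Function.comp_apply, List.cons.injEq, and_true]
      intro k _
      omega

-- general shapes of B's slice/reverse of a range map
theorem drop_map_range {α : Type} (n m : Nat) (g : Nat → α) :
    ((List.range n).map g).drop m = (List.range (n - m)).map (fun j => g (m + j)) := by
  apply List.ext_getElem
  · simp
  · intro i h1 h2
    simp

theorem reverse_map_range {α : Type} (U : Nat) (g : Nat → α) :
    ((List.range U).map g).reverse = (List.range U).map (fun j => g (U - 1 - j)) := by
  apply List.ext_getElem
  · simp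
  · intro i h1 h2
    simp [List.getElem_reverse]

-- B's reversed head slice of a clipped diagonal is the outgoing upper ray, nearest first
theorem sliceRev_pyRange_map (up down : Int) (hu : 0 ≤ up) (hd : 0 ≤ down) (f : Int → List Int) :
    (PySem.List.slice ((PySem.List.pyRange (-up) (down + 1) 1).map f) none (some up)).reverse
      = (List.range up.toNat).map (fun (k : Nat) => f (-((k : Int) + 1))) := by
  obtain ⟨U, rfl⟩ : ∃ U : Nat, up = (U : Int) := ⟨up.toNat, by omega⟩
  obtain ⟨D, rfl⟩ : ∃ D : Nat, down = (D : Int) := ⟨down.toNat, by omega⟩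
  rw [PySem.List.pyRange_one, List.map_map, PySem.List.slice_to_natCast,
      ← List.map_take, List.take_range]
  have hmin : min U (((D : Int) + 1 - -(U : Int)).toNat) = U := by omega
  rw [hmin, reverse_map_range]
  simp only [Int.toNat_natCast]
  apply List.map_congr_left
  intro j hj
  rw [List.mem_range] at hj
  simp only [Function.comp_apply]
  congr 1
  omega

-- B's tail slice of a clipped diagonal is the outgoing lower ray
theorem sliceDrop_pyRange_map (up down : Int) (hu : 0 ≤ up) (hd : 0 ≤ down) (f : Int → List Int) :
    PySem.List.slice ((PySem.List.pyRange (-up) (down + 1) 1).map f) (some (up + 1)) none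
      = (List.range down.toNat).map (fun (k : Nat) => f ((k : Int) + 1)) := by
  obtain ⟨U, rfl⟩ : ∃ U : Nat, up = (U : Int) := ⟨up.toNat, by omega⟩
  obtain ⟨D, rfl⟩ : ∃ D : Nat, down = (D : Int) := ⟨down.toNat, by omega⟩
  have hup : (U : Int) + 1 = ((U + 1 : Nat) : Int) := by omega
  rw [PySem.List.pyRange_one, List.map_map, hup, PySem.List.slice_from_natCast,
      drop_map_range]
  have hlen : ((D : Int) + 1 - -(U : Int)).toNat - (U + 1) = D := by omega
  rw [hlen]
  simp only [Int.toNat_natCast]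
  apply List.map_congr_left
  intro j hj
  rw [List.mem_range] at hj
  simp only [Function.comp_apply]
  congr 1
  omega

-- ===== VERDICT (by name: the statement is the Claim_ definition above) =====
theorem naname_spec : Claim_equal_naname := by
  intro l _ hpre
  match l, hpre with
  | a :: b :: t, _ => ?_
  unfold Spec_naname naname naname_alt
  have hnn : (0:Int) ≤ (t.length : Int) + 1 := by positivity
  simp [PySem.List.pyGet?, PySem.List.pyIdx?, hnn]
  rw [nanameLoopUL_range (min a b).toNat a b rfl,
      nanameLoopUR_range (min a (7 - b)).toNat a b rfl,
      nanameLoopDL_range (min (7 - a) b).toNat a b rfl,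
      nanameLoopDR_range (min (7 - a) (7 - b)).toNat a b rfl,
      sliceRev_pyRange_map (max (min a b) 0) (max (min (7 - a) (7 - b)) 0)
        (le_max_right _ _) (le_max_right _ _),
      sliceDrop_pyRange_map (max (min a b) 0) (max (min (7 - a) (7 - b)) 0)
        (le_max_right _ _) (le_max_right _ _),
      sliceRev_pyRange_map (max (min (7 - a) b) 0) (max (min a (7 - b)) 0)
        (le_max_right _ _) (le_max_right _ _),
      sliceDrop_pyRange_map (max (min (7 - a) b) 0) (max (min a (7 - b)) 0)
        (le_max_right _ _) (le_max_right _ _)]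
  have e1 : (max (min a b) 0).toNat = (min a b).toNat := by omega
  have e2 : (max (min (7 - a) (7 - b)) 0).toNat = (min (7 - a) (7 - b)).toNat := by omega
  have e3 : (max (min (7 - a) b) 0).toNat = (min (7 - a) b).toNat := by omega
  have e4 : (max (min a (7 - b)) 0).toNat = (min a (7 - b)).toNat := by omega
  rw [e1, e2, e3, e4]
  congr 1
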